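-- pv_equiv track=rewrite | github.com/jtmcg/game-design-course-code | Day1.1/comboActivity.py | BowDamage
-- ===== SOURCE A (Python) =====
-- bowAttackDictionary = {"single shot": 8, "poison shot" : 3, "snap shot" : 6, "double shot" : 15, "aim" : 0}
--
-- def BowDamage(combo):
--     damage = 0
--     poisoned = False
--
--     for x in range(len(combo)):
--         if combo[x] == "poison shot":
--             poisoned = True
--
--         if x != 0:
--             if combo[x-1] == "aim" and combo[x] != "double shot":
--                 damage += bowAttackDictionary[combo[x]]*2
--             elif combo[x-1] == "snap shot" and combo[x] == "double shot":
--                 aimed = 1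
--                 if x > 1:
--                     if combo[x-2] == "aim":
--                         aimed = 2
--                 damage += (bowAttackDictionary[combo[x]]+bowAttackDictionary["snap shot"])*aimed
--             elif combo[x-1] == "double shot" and combo[x] == "snap shot":
--                 damage += bowAttackDictionary[combo[x]]//2
--             else:
--                 damage += bowAttackDictionary[combo[x]]
--         else:
--             damage += bowAttackDictionary[combo[x]]
--
--         if poisoned:
--             damage += bowAttackDictionary["poison shot"]
--
--     return damage
-- ===== SOURCE B (Python) =====
-- bowAttackDictionary = {"single shot": 8, "poison shot": 3, "snap shot": 6, "double shot": 15, "aim": 0}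
--
-- def BowDamage(combo):
--     # base damage of every move, summed in one pass
--     total = sum(bowAttackDictionary[x] for x in combo)
--     # poison ticks once per turn from the first poison shot onward: closed form
--     if "poison shot" in combo:
--         total += 3 * (len(combo) - combo.index("poison shot"))
--     # adjacency corrections relative to the base damage
--     for i in range(1, len(combo)):
--         prev, cur = combo[i - 1], combo[i]
--         if prev == "aim" and cur != "double shot":
--             total += bowAttackDictionary[cur]
--         elif prev == "snap shot" and cur == "double shot":
--             total += 21 * (2 if i > 1 and combo[i - 2] == "aim" else 1) - 15
--         elif prev == "double shot" and cur == "snap shot":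
--             total -= 3
--     return total
-- ===== Notes on version B (the rewrite author's own statement) =====
-- stated objective: alternative
-- what changed: B replaces A's single stateful loop (poisoned flag threaded through every iteration) by three independent parts: a one-pass base-damage sum, a closed-form poison bonus 3*(len-first_index) computed from the first poison-shot index, and a correction loop over adjacent pairs that adds only the delta of each bonus relative to the base damage.
import Mathlib
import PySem

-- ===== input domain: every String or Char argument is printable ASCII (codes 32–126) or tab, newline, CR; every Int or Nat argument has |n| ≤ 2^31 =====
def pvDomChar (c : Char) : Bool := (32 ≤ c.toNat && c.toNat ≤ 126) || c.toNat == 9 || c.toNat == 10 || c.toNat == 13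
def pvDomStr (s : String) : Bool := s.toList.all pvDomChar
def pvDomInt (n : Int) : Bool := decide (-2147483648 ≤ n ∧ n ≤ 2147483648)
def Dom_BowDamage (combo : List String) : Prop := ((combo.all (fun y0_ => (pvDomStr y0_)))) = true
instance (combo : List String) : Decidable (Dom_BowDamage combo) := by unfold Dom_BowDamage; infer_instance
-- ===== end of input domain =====

-- B computes the poison bonus in closed form from the first poison-shot index and adds
-- per-pair adjacency corrections to a one-pass base-damage sum, instead of A's single
-- stateful loop threading a poisoned flag; same O(n) cost, different decomposition.


-- ===== PORT A =====
def bowAttackDictionary : PySem.Dict String Int :=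
  PySem.Dict.ofList [("single shot", 8), ("poison shot", 3), ("snap shot", 6), ("double shot", 15), ("aim", 0)]

-- bowAttackDictionary[s]; exact under Pre_BowDamage (which excludes the KeyError inputs)
def bowVal (s : String) : Int := (bowAttackDictionary.get? s).getD 0

-- the body of A's 'for x in range(len(combo))' loop, state = (damage, poisoned)
def aStep (combo : List String) (st : Int × Bool) (x : Int) : Int × Bool :=
  let poisoned : Bool := if PySem.List.pyGetD combo x "" == "poison shot" then true else st.2
  let damage : Int :=
    if x ≠ 0 then
      if PySem.List.pyGetD combo (x - 1) "" == "aim" && !(PySem.List.pyGetD combo x "" == "double shot") then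
        st.1 + bowVal (PySem.List.pyGetD combo x "") * 2
      else if PySem.List.pyGetD combo (x - 1) "" == "snap shot" && PySem.List.pyGetD combo x "" == "double shot" then
        st.1 + (bowVal (PySem.List.pyGetD combo x "") + bowVal "snap shot") *
          (if 1 < x then (if PySem.List.pyGetD combo (x - 2) "" == "aim" then 2 else 1) else 1)
      else if PySem.List.pyGetD combo (x - 1) "" == "double shot" && PySem.List.pyGetD combo x "" == "snap shot" then
        st.1 + PySem.Int.floordiv (bowVal (PySem.List.pyGetD combo x "")) 2
      else st.1 + bowVal (PySem.List.pyGetD combo x "")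
    else st.1 + bowVal (PySem.List.pyGetD combo x "")
  (if poisoned then damage + bowVal "poison shot" else damage, poisoned)

def BowDamage (combo : List String) : Int :=
  ((PySem.List.pyRange 0 (combo.length : Int) 1).foldl (aStep combo) (0, false)).1

-- ===== PORT B =====
-- the body of B's correction loop 'for i in range(1, len(combo))'
def bStep (combo : List String) (t : Int) (i : Int) : Int :=
  if PySem.List.pyGetD combo (i - 1) "" == "aim" && !(PySem.List.pyGetD combo i "" == "double shot") then
    t + bowVal (PySem.List.pyGetD combo i "")
  else if PySem.List.pyGetD combo (i - 1) "" == "snap shot" && PySem.List.pyGetD combo i "" == "double shot" then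
    t + 21 * (if 1 < i && (PySem.List.pyGetD combo (i - 2) "" == "aim") then 2 else 1) - 15
  else if PySem.List.pyGetD combo (i - 1) "" == "double shot" && PySem.List.pyGetD combo i "" == "snap shot" then
    t - 3
  else t

def BowDamage_alt (combo : List String) : Int :=
  let total : Int := (combo.map bowVal).sum
  let total : Int :=
    if combo.contains "poison shot" then
      total + 3 * ((combo.length : Int) - (((PySem.List.index? combo "poison shot").getD 0 : Nat) : Int))
    else total
  (PySem.List.pyRange 1 (combo.length : Int) 1).foldl (bStep combo) total

-- ===== PRECONDITION & SPEC =====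
-- Pre_ excludes exactly the inputs where Python A raises KeyError (a move not in the damage table).
def Pre_BowDamage (combo : List String) : Prop :=
  ∀ s ∈ combo, s = "single shot" ∨ s = "poison shot" ∨ s = "snap shot" ∨ s = "double shot" ∨ s = "aim"
instance (combo : List String) : Decidable (Pre_BowDamage combo) := by unfold Pre_BowDamage; infer_instance
def pvWitness_BowDamage : List String :=
  ["aim", "snap shot", "double shot", "snap shot", "poison shot", "single shot"]

def Spec_BowDamage (combo : List String) (out : Int) : Prop := out = BowDamage_alt combo
instance (combo : List String) (out : Int) : Decidable (Spec_BowDamage combo out) := by unfold Spec_BowDamage; infer_instance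

-- ===== CLAIM (what is proved, stated in full; the proofs are below) =====
def Claim_equal_BowDamage : Prop := ∀ (combo : List String), Dom_BowDamage combo → Pre_BowDamage combo → Spec_BowDamage combo (BowDamage combo)

-- ===== LEMMAS AND PROOFS =====

-- B's correction delta at index i, relative to base damage
def corrDelta (combo : List String) (i : Int) : Int :=
  if PySem.List.pyGetD combo (i - 1) "" == "aim" && !(PySem.List.pyGetD combo i "" == "double shot") then
    bowVal (PySem.List.pyGetD combo i "")
  else if PySem.List.pyGetD combo (i - 1) "" == "snap shot" && PySem.List.pyGetD combo i "" == "double shot" then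
    21 * (if 1 < i && (PySem.List.pyGetD combo (i - 2) "" == "aim") then 2 else 1) - 15
  else if PySem.List.pyGetD combo (i - 1) "" == "double shot" && PySem.List.pyGetD combo i "" == "snap shot" then
    -3
  else 0

-- the closed-form poison bonus for the first k turns
def poisBonus (combo : List String) (k : Nat) : Int :=
  match PySem.List.index? combo "poison shot" with
  | some m => if m < k then 3 * ((k : Int) - (m : Int)) else 0
  | none => 0

lemma bStep_eq_add (combo : List String) :
    bStep combo = fun t i => t + corrDelta combo i := by
  funext t i
  simp only [bStep, corrDelta]
  split_ifs <;> ring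

lemma poisBonus_zero (combo : List String) : poisBonus combo 0 = 0 := by
  unfold poisBonus
  cases PySem.List.index? combo "poison shot" <;> simp

lemma mem_take_iff (combo : List String) (k : Nat) :
    "poison shot" ∈ combo.take k ↔
      ∃ m, PySem.List.index? combo "poison shot" = some m ∧ m < k := by
  cases h : PySem.List.index? combo "poison shot" with
  | none =>
    constructor
    · intro hmem
      exact absurd (List.mem_of_mem_take hmem) ((PySem.List.index?_eq_none_iff _ _).mp h)
    · rintro ⟨m, hm, -⟩; cases hm
  | some m =>
    obtain ⟨hmlen, hmv, hmin⟩ := PySem.List.getElem_of_index?_eq_some h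
    constructor
    · intro hmem
      obtain ⟨j, hj, hjv⟩ := List.mem_take_iff_getElem.mp hmem
      refine ⟨m, rfl, ?_⟩
      by_contra hmk
      exact hmin j (by omega) hjv
    · rintro ⟨m', hm', hmk⟩
      injection hm' with hm'; subst hm'
      exact List.mem_take_iff_getElem.mpr ⟨m, by omega, hmv⟩

lemma poisBonus_succ (combo : List String) (k : Nat) (hkl : k < combo.length) :
    poisBonus combo (k + 1) =
      poisBonus combo k +
        (if combo[k] = "poison shot" ∨ "poison shot" ∈ combo.take k then 3 else 0) := by
  unfold poisBonus
  cases h : PySem.List.index? combo "poison shot" with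
  | none =>
    have hnot : "poison shot" ∉ combo := (PySem.List.index?_eq_none_iff _ _).mp h
    have h1 : combo[k] ≠ "poison shot" := fun hc => hnot (hc ▸ List.getElem_mem hkl)
    have h2 : "poison shot" ∉ combo.take k := fun hc => hnot (List.mem_of_mem_take hc)
    simp [h1, h2]
  | some m =>
    obtain ⟨hmlen, hmv, hmin⟩ := PySem.List.getElem_of_index?_eq_some h
    dsimp only
    rcases lt_trichotomy m k with hmk | hmk | hmk
    · have hmem : "poison shot" ∈ combo.take k := (mem_take_iff combo k).mpr ⟨m, h, hmk⟩
      rw [if_pos (by omega : m < k + 1), if_pos hmk, if_pos (Or.inr hmem)]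
      push_cast; ring
    · subst hmk
      rw [if_pos (Nat.lt_succ_self m), if_neg (lt_irrefl m), if_pos (Or.inl hmv)]
      push_cast; ring
    · have h1 : combo[k] ≠ "poison shot" := hmin k hmk
      have h2 : "poison shot" ∉ combo.take k := fun hc => by
        obtain ⟨m', hm', hm'k⟩ := (mem_take_iff combo k).mp hc
        rw [h] at hm'; injection hm' with hm'
        omega
      rw [if_neg (by omega : ¬ m < k + 1), if_neg (by omega : ¬ m < k),
          if_neg (by tauto)]
      ring

lemma take_succ_eq (combo : List String) (k : Nat) (hkl : k < combo.length) :
    combo.take (k + 1) = combo.take k ++ [combo[k]] := by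
  rw [List.take_succ]
  simp [List.getElem?_eq_getElem hkl]

lemma bowVal_poison : bowVal "poison shot" = 3 := rfl
lemma bowVal_double : bowVal "double shot" = 15 := rfl
lemma bowVal_snap : bowVal "snap shot" = 6 := rfl
lemma floordiv_six_two : PySem.Int.floordiv 6 2 = 3 := rfl

-- the step of A, for indices ≥ 1, decomposed into base + correction + poison tick
lemma aStep_fst (combo : List String) (st : Int × Bool) (x : Int) (hx : 1 ≤ x) :
    (aStep combo st x).1 =
      st.1 + bowVal (PySem.List.pyGetD combo x "") + corrDelta combo x +
        (if (aStep combo st x).2 then 3 else 0) := by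
  have hx0 : x ≠ 0 := by omega
  simp only [aStep, corrDelta, hx0, if_true, ne_eq, not_false_iff, bowVal_poison]
  split_ifs <;>
    simp_all [Bool.and_eq_true, beq_iff_eq, bowVal_snap, bowVal_double, floordiv_six_two] <;>
    first | ring1 | omega | tauto

lemma aStep_snd (combo : List String) (st : Int × Bool) (x : Int) :
    (aStep combo st x).2 = ((PySem.List.pyGetD combo x "" == "poison shot") || st.2) := by
  simp only [aStep]
  split_ifs with h <;> simp [h]

-- step 0 of A
lemma aStep_zero (combo : List String) (st : Int × Bool) :
    (aStep combo st 0).1 =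
      st.1 + bowVal (PySem.List.pyGetD combo 0 "") + (if (aStep combo st 0).2 then 3 else 0) := by
  simp only [aStep, ne_eq, not_true, bowVal_poison]
  split_ifs <;> first | ring1 | omega | contradiction

-- the main invariant: A's loop after k turns = base sum + corrections + poison bonus, flag = poison seen
lemma A_inv (combo : List String) (k : Nat) (hk : k ≤ combo.length) :
    (PySem.List.pyRange 0 (k : Int) 1).foldl (aStep combo) (0, false) =
      (((combo.take k).map bowVal).sum +
         ((PySem.List.pyRange 1 (k : Int) 1).map (corrDelta combo)).sum +
         poisBonus combo k,
       decide ("poison shot" ∈ combo.take k)) := by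
  induction k with
  | zero =>
    rw [PySem.List.pyRange_one_eq_nil (by norm_num), PySem.List.pyRange_one_eq_nil (by norm_num)]
    simp [poisBonus_zero]
  | succ k ih =>
    have hkl : k < combo.length := by omega
    have hk' : k ≤ combo.length := by omega
    have hcast : ((k + 1 : Nat) : Int) = (k : Int) + 1 := by push_cast; ring
    rw [hcast, PySem.List.pyRange_one_succ_right (by omega), List.foldl_append,
        List.foldl_cons, List.foldl_nil, ih hk']
    have hcur : PySem.List.pyGetD combo (k : Int) "" = combo[k] := by
      rw [PySem.List.pyGetD_eq_getElem combo "" (by omega) (by exact_mod_cast hkl)]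
      simp
    have htake := take_succ_eq combo k hkl
    have hflag :
        (decide ("poison shot" ∈ combo.take (k + 1))) =
          ((PySem.List.pyGetD combo (k : Int) "" == "poison shot") ||
            decide ("poison shot" ∈ combo.take k)) := by
      rw [htake, hcur, Bool.eq_iff_iff]
      simp only [decide_eq_true_eq, List.mem_append, List.mem_singleton, Bool.or_eq_true,
        beq_iff_eq]
      constructor
      · rintro (h | h)
        exacts [Or.inr h, Or.inl h.symm]
      · rintro (h | h)
        exacts [Or.inr h.symm, Or.inl h]
    have hsnd := aStep_snd combo
      (((combo.take k).map bowVal).sum +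
         ((PySem.List.pyRange 1 (k : Int) 1).map (corrDelta combo)).sum + poisBonus combo k,
       decide ("poison shot" ∈ combo.take k)) (k : Int)
    refine Prod.ext ?_ ?_
    · -- first component
      rcases Nat.eq_zero_or_pos k with hk0 | hk0
      · subst hk0
        simp only [Nat.cast_zero] at hsnd hflag hcur ⊢
        have e1 : (PySem.List.pyRange 1 (0 : Int) 1) = [] :=
          PySem.List.pyRange_one_eq_nil (by norm_num)
        have e2 : (PySem.List.pyRange 1 ((0 : Int) + 1) 1) = [] :=
          PySem.List.pyRange_one_eq_nil (by norm_num)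
        rw [aStep_zero, e1, e2, poisBonus_succ combo 0 hkl, poisBonus_zero, htake]
        simp only [hsnd, hflag, hcur, List.take_zero, List.map_nil, List.sum_nil,
          List.map_append, List.sum_append, List.map_cons, List.sum_cons,
          Bool.or_eq_true, beq_iff_eq, decide_eq_true_eq, List.not_mem_nil, or_false,
          Bool.or_false, List.nil_append]
        split_ifs <;> simp_all <;> ring
      · rw [aStep_fst combo _ _ (by exact_mod_cast hk0)]
        rw [PySem.List.pyRange_one_succ_right (a := 1) (b := (k : Int)) (by exact_mod_cast hk0),
            List.map_append, List.sum_append, List.map_cons, List.map_nil, List.sum_cons,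
            List.sum_nil]
        rw [poisBonus_succ combo k hkl, htake]
        simp only [hsnd, hcur, List.map_append, List.sum_append, List.map_cons,
          List.map_nil, List.sum_cons, List.sum_nil, Bool.or_eq_true, beq_iff_eq,
          decide_eq_true_eq]
        split_ifs <;> simp_all <;> ring
    · rw [hsnd, hflag]

-- B's correction fold is the correction sum
lemma B_fold (combo : List String) (t : Int) :
    (PySem.List.pyRange 1 (combo.length : Int) 1).foldl (bStep combo) t =
      t + ((PySem.List.pyRange 1 (combo.length : Int) 1).map (corrDelta combo)).sum := by
  rw [bStep_eq_add]
  exact PySem.List.foldl_add _ _ _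

-- the poison closed form agrees with B's contains/index computation
lemma poisBonus_full (combo : List String) :
    poisBonus combo combo.length =
      (if combo.contains "poison shot" then
        3 * ((combo.length : Int) - (((PySem.List.index? combo "poison shot").getD 0 : Nat) : Int))
      else 0) := by
  unfold poisBonus
  cases h : PySem.List.index? combo "poison shot" with
  | none =>
    have hnot : "poison shot" ∉ combo := (PySem.List.index?_eq_none_iff _ _).mp h
    simp [hnot]
  | some m =>
    obtain ⟨hmlen, hmv, -⟩ := PySem.List.getElem_of_index?_eq_some h
    have hmem : "poison shot" ∈ combo := hmv ▸ List.getElem_mem hmlen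
    simp [hmlen, hmem]

-- ===== VERDICT (by name: the statement is the Claim_ definition above) =====
theorem BowDamage_spec : Claim_equal_BowDamage := by
  intro combo _ _
  show BowDamage combo = BowDamage_alt combo
  unfold BowDamage BowDamage_alt
  rw [A_inv combo combo.length le_rfl, B_fold, poisBonus_full]
  simp only [List.take_length]
  split_ifs <;> ring
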